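-- pv_equiv track=rewrite | github.com/mvanede/advent-of-code-2020 | ass-day-14-2.py | get_floating_possibilities
-- ===== SOURCE A (Python) =====
-- def get_floating_possibilities(mask):
--     first_char = mask[0]
--
--     if first_char == 'X':
--         results = ['1', '0']
--     else:
--         results = [first_char]
--
--     if len(mask) > 1:
--         combinations = []
--         for m in get_floating_possibilities(mask[1:]):
--             for r in results:
--                 combinations.append(r + m)
--         return combinations
--     else:
--         return results
-- ===== SOURCE B (Python) =====
-- def get_floating_possibilities(mask):
--     x = mask.count('X')
--     out = []
--     for k in range(2 ** x):
--         chars = []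
--         for c in mask:
--             if c == 'X':
--                 chars.append('1' if k % 2 == 0 else '0')
--                 k //= 2
--             else:
--                 chars.append(c)
--         out.append(''.join(chars))
--     return out
-- ===== Notes on version B (the rewrite author's own statement) =====
-- stated objective: alternative
-- what changed: Replaces A's recursion over the mask tail (which copies mask[1:] at every level and rebuilds the combination list pairwise) by enumerating the integers 0..2^x-1 (x = number of X's) and decoding each integer's bits into the X positions in one left-to-right scan of the mask.
import Mathlib
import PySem

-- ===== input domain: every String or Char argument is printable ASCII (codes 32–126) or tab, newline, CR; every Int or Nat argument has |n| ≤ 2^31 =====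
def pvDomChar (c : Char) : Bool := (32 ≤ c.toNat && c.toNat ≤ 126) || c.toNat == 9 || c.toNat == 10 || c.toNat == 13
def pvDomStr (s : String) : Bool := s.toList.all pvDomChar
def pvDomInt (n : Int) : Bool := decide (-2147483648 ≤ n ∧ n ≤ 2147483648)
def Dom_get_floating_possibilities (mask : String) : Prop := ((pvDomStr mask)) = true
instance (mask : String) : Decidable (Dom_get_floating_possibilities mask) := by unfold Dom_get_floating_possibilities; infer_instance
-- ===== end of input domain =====

-- B replaces A's recursion on the mask tail by enumerating the integers 0..2^x-1
-- (x = number of X's) and decoding each one's bits into the X positions;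
-- equivalence proved on nonempty masks (A raises IndexError on "", B returns [""]).

-- ===== PORT A =====
-- recursion over the character list; [] is Python's IndexError case (excluded by Pre_)
def pvGoA : List Char → List (List Char)
  | [] => []
  | c :: rest =>
    let results : List (List Char) := if c = 'X' then [['1'], ['0']] else [[c]]
    if rest.length > 0 then
      -- for m in rec(mask[1:]): for r in results: combinations.append(r + m)
      (pvGoA rest).foldl (fun acc m => acc ++ results.map (fun r => r ++ m)) []
    else
      results

def get_floating_possibilities (mask : String) : List String :=
  (pvGoA mask.toList).map String.ofList

-- ===== PORT B =====
-- inner loop of Source B: scan the mask once, consuming one bit of k per 'X'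
def pvFillB : List Char → Nat → List Char
  | [], _ => []
  | c :: rest, k =>
    if c = 'X' then (if k % 2 = 0 then '1' else '0') :: pvFillB rest (k / 2)
    else c :: pvFillB rest k

-- x = mask.count('X'); [fill(mask, k) for k in range(2 ** x)]
def get_floating_possibilities_alt (mask : String) : List String :=
  let cs := mask.toList
  (List.range (2 ^ cs.count 'X')).map (fun k => String.ofList (pvFillB cs k))

-- ===== PRECONDITION & SPEC =====
-- Pre_ excludes only the empty mask, on which A raises IndexError (mask[0]).
def Pre_get_floating_possibilities (mask : String) : Prop := mask ≠ ""
instance (mask : String) : Decidable (Pre_get_floating_possibilities mask) := by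
  unfold Pre_get_floating_possibilities; infer_instance

def pvWitness_get_floating_possibilities : String := "X0X"

def Spec_get_floating_possibilities (mask : String) (out : List String) : Prop :=
  out = get_floating_possibilities_alt mask
instance (mask : String) (out : List String) : Decidable (Spec_get_floating_possibilities mask out) := by
  unfold Spec_get_floating_possibilities; infer_instance

-- ===== CLAIM (what is proved, stated in full; the proofs are below) =====
def Claim_equal_get_floating_possibilities : Prop := ∀ (mask : String), Dom_get_floating_possibilities mask → Pre_get_floating_possibilities mask → Spec_get_floating_possibilities mask (get_floating_possibilities mask)

-- ===== LEMMAS AND PROOFS =====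

-- A's double append-loop is a flatMap
theorem pvGoA_cons_cons (c d : Char) (rest : List Char) :
    pvGoA (c :: d :: rest) =
      (pvGoA (d :: rest)).flatMap
        (fun m => (if c = 'X' then [['1'], ['0']] else [[c]]).map (fun r => r ++ m)) := by
  show ((pvGoA (d :: rest)).foldl (fun acc m => acc ++ _) []) = _
  rw [PySem.List.foldl_append_eq_flatMap]
  simp

theorem pvFillB_X_even (rest : List Char) (j : Nat) :
    pvFillB ('X' :: rest) (2 * j) = '1' :: pvFillB rest j := by
  simp [pvFillB, Nat.mul_div_cancel_left j (by norm_num : (0:Nat) < 2)]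

theorem pvFillB_X_odd (rest : List Char) (j : Nat) :
    pvFillB ('X' :: rest) (2 * j + 1) = '0' :: pvFillB rest j := by
  have h2 : (2 * j + 1) / 2 = j := by omega
  have h1 : (2 * j + 1) % 2 = 1 := by omega
  simp [pvFillB, h1, h2]

-- range of a doubled bound enumerated in even/odd pairs
theorem range_two_mul_map {α : Type} (g : Nat → α) (n : Nat) :
    (List.range (2 * n)).map g =
      (List.range n).flatMap (fun j => [g (2 * j), g (2 * j + 1)]) := by
  induction n with
  | zero => simp
  | succ n ih =>
    have : 2 * (n + 1) = (2 * n) + 1 + 1 := by ring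
    rw [this, List.range_succ, List.range_succ, List.range_succ]
    simp [ih]

-- main induction: A's recursion equals B's bit-enumeration on nonempty lists
theorem pvGoA_eq_fill (l : List Char) (h : l ≠ []) :
    pvGoA l = (List.range (2 ^ l.count 'X')).map (pvFillB l) := by
  induction l with
  | nil => exact absurd rfl h
  | cons c rest ih =>
    cases rest with
    | nil =>
      by_cases hc : c = 'X' <;>
        simp [pvGoA, pvFillB, hc, List.range_succ]
    | cons d rest' =>
      rw [pvGoA_cons_cons, ih (by simp)]
      by_cases hc : c = 'X'
      · subst hc
        have hcount : ('X' :: d :: rest').count 'X' = (d :: rest').count 'X' + 1 := by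
          simp [List.count_cons]
        rw [hcount, pow_succ, mul_comm, range_two_mul_map]
        simp only [List.flatMap_map]
        congr 1
        funext j
        simp [pvFillB_X_even, pvFillB_X_odd]
      · have hcount : (c :: d :: rest').count 'X' = (d :: rest').count 'X' := by
          simp [List.count_cons, hc]
        rw [hcount]
        induction (List.range (2 ^ (d :: rest').count 'X')) with
        | nil => simp
        | cons a tl ihl => simp_all [pvFillB]

-- ===== VERDICT (by name: the statement is the Claim_ definition above) =====
theorem get_floating_possibilities_spec : Claim_equal_get_floating_possibilities := by
  intro mask _ hpre
  show get_floating_possibilities mask = get_floating_possibilities_alt mask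
  unfold get_floating_possibilities get_floating_possibilities_alt
  rw [pvGoA_eq_fill]
  · simp
  · intro h
    apply hpre
    have := congrArg String.ofList h
    simpa using this
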